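-- pv_equiv track=rewrite | github.com/saurabhpatil/PythonLearning | ExtremeGraphics.py | apply_replacement_rules
-- ===== SOURCE A (Python) =====
-- def apply_replacement_rules(s, rules, n):
--     def replacement(s):
--         result = ""
--         for char in s:
--             if char in rules:
--                 result += rules[char]
--             else:
--                 result += char
--         return result
--
--     def nth_substitution(s, n):
--
--         if n == 0:
--             return s
--         else:
--             return nth_substitution(replacement(s), n-1)
--     return nth_substitution(s, n)
-- ===== SOURCE B (Python) =====
-- def apply_replacement_rules(s, rules, n):
--     result = s
--     for _ in range(n):
--         result = "".join(rules.get(c, c) for c in result)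
--     return result
-- ===== Notes on version B (the rewrite author's own statement) =====
-- stated objective: idiomatic
-- what changed: Replaces the recursive counter helper and character-by-character string concatenation with an iterative range loop whose body is a single ''.join(rules.get(c, c) for c in result).
import Mathlib
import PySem

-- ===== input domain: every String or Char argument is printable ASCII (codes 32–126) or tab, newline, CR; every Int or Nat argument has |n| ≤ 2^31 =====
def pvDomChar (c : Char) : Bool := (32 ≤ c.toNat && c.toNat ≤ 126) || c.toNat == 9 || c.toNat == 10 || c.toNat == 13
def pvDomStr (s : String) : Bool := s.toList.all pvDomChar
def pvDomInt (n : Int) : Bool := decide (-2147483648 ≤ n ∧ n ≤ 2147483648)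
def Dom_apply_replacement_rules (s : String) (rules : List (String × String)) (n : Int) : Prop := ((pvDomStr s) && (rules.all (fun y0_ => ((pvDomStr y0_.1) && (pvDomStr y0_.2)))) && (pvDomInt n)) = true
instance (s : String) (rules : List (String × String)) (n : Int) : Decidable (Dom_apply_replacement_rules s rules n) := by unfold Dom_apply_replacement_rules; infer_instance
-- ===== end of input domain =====

-- B replaces A's recursive counter helper and += concatenation by an iterative
-- range loop over ''.join(rules.get(c, c) for c in result); equal on n ≥ 0.


-- ===== PORT A =====
-- A's inner `replacement`: result = ""; for char in s: result += rules[char] if char in rules else char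
def pvReplA (d : PySem.Dict String String) (s : String) : String :=
  String.ofList (s.toList.foldl (fun acc c =>
    let key := String.ofList [c]
    if d.contains key then acc ++ ((d.get? key).getD "").toList
    else acc ++ [c]) [])

-- A's inner `nth_substitution`, recursion on the counter (n ≥ 0 under Pre_)
def pvNthA (d : PySem.Dict String String) (s : String) : Nat → String
  | 0 => s
  | Nat.succ k => pvNthA d (pvReplA d s) k

def apply_replacement_rules (s : String) (rules : List (String × String)) (n : Int) : String :=
  pvNthA (PySem.Dict.ofList rules) s n.toNat

-- ===== PORT B =====
-- B's loop body: ''.join(rules.get(c, c) for c in result)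
def pvReplB (d : PySem.Dict String String) (s : String) : String :=
  String.ofList ((s.toList.map (fun c => (d.getD (String.ofList [c]) (String.ofList [c])).toList)).flatten)

def apply_replacement_rules_alt (s : String) (rules : List (String × String)) (n : Int) : String :=
  (List.range n.toNat).foldl (fun result _ => pvReplB (PySem.Dict.ofList rules) result) s

-- ===== PRECONDITION & SPEC =====
-- Pre_ excludes n < 0, on which A's nth_substitution never reaches its base case (RecursionError).
def Pre_apply_replacement_rules (s : String) (rules : List (String × String)) (n : Int) : Prop := 0 ≤ n
instance (s : String) (rules : List (String × String)) (n : Int) : Decidable (Pre_apply_replacement_rules s rules n) := by unfold Pre_apply_replacement_rules; infer_instance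
def pvWitness_apply_replacement_rules : String × (List (String × String)) × Int := ("ab", [("a", "bb")], 2)

def Spec_apply_replacement_rules (s : String) (rules : List (String × String)) (n : Int) (out : String) : Prop := out = apply_replacement_rules_alt s rules n
instance (s : String) (rules : List (String × String)) (n : Int) (out : String) : Decidable (Spec_apply_replacement_rules s rules n out) := by unfold Spec_apply_replacement_rules; infer_instance

-- ===== CLAIM (what is proved, stated in full; the proofs are below) =====
def Claim_equal_apply_replacement_rules : Prop := ∀ (s : String) (rules : List (String × String)) (n : Int), Dom_apply_replacement_rules s rules n → Pre_apply_replacement_rules s rules n → Spec_apply_replacement_rules s rules n (apply_replacement_rules s rules n)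

-- ===== LEMMAS AND PROOFS =====
-- one pass of A equals one pass of B
theorem pvRepl_eq (d : PySem.Dict String String) (s : String) :
    pvReplA d s = pvReplB d s := by
  unfold pvReplA pvReplB
  rw [show (fun (acc : List Char) (c : Char) =>
        let key := String.ofList [c]
        if d.contains key then acc ++ ((d.get? key).getD "").toList
        else acc ++ [c])
      = fun acc c => acc ++ (if d.contains (String.ofList [c])
          then ((d.get? (String.ofList [c])).getD "").toList else [c]) from by
        funext acc c; dsimp only; split <;> rfl]
  rw [PySem.List.foldl_append_eq_flatMap, List.flatMap_def, List.nil_append]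
  refine congrArg (fun l => String.ofList l.flatten) (List.map_congr_left fun c _ => ?_)
  rcases h : d.get? (String.ofList [c]) with _ | v
  · rw [PySem.Dict.getD_eq_get?_getD, h]
    simp [PySem.Dict.contains_eq_isSome_get?, h, String.toList_ofList]
  · simp [PySem.Dict.contains_eq_isSome_get?, h, PySem.Dict.getD_eq_get?_getD]

-- A's counter recursion is iteration of the pass
theorem pvNthA_iter (d : PySem.Dict String String) :
    ∀ (k : Nat) (s : String), pvNthA d s k = (pvReplB d)^[k] s := by
  intro k
  induction k with
  | zero => intro s; rfl
  | succ k ih =>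
    intro s
    rw [pvNthA, ih, pvRepl_eq, ← Function.iterate_succ_apply]

-- B's range loop is iteration of the pass
theorem pvFoldB_iter (d : PySem.Dict String String) (k : Nat) (s : String) :
    (List.range k).foldl (fun result _ => pvReplB d result) s = (pvReplB d)^[k] s := by
  induction k with
  | zero => rfl
  | succ k ih =>
    rw [List.range_succ, List.foldl_append, ih, Function.iterate_succ_apply']
    rfl

-- ===== VERDICT (by name: the statement is the Claim_ definition above) =====
theorem apply_replacement_rules_spec : Claim_equal_apply_replacement_rules := by
  intro s rules n _ _
  unfold Spec_apply_replacement_rules apply_replacement_rules apply_replacement_rules_alt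
  rw [pvNthA_iter, pvFoldB_iter]
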